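-- pv_equiv track=rewrite | github.com/HimanshuLadva/Python-DSA | Leetcode/daily/202512/20251218.py | maxProfitV1
-- ===== SOURCE A (Python) =====
-- from typing import List
--
-- def maxProfitV1(prices: List[int], strategy: List[int], k: int) -> int:
--     n = len(prices)
--     max_profit = 0
--     total = sum(p * s for p,s in zip(prices, strategy))
--     max_profit = total
--
--     need = k//2
--     replacement = [0] * need + [1] * (k - need)
--     for i in range(n-k+1):
--         new_strategy = strategy[:]
--         new_strategy[i:i+k] = replacement
--         total = sum(p * s for p,s in zip(prices, new_strategy))
--         if max_profit < total:
--             max_profit = total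
--
--     return max_profit
-- ===== SOURCE B (Python) =====
-- from typing import List
--
-- def maxProfitV1(prices: List[int], strategy: List[int], k: int) -> int:
--     n = len(prices)
--     ps = [0]   # prefix sums of prices[j] * strategy[j]
--     pp = [0]   # prefix sums of prices[j]
--     for p, s in zip(prices, strategy):
--         ps.append(ps[-1] + p * s)
--         pp.append(pp[-1] + p)
--     base = ps[-1]
--     best = base
--     h = k - k // 2          # number of trailing 1s in the replacement window
--     for i in range(n - k + 1):
--         cand = base - (ps[i + k] - ps[i]) + (pp[i + k] - pp[i + k - h])
--         if best < cand:
--             best = cand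
--     return best
-- ===== Notes on version B (the rewrite author's own statement) =====
-- stated objective: faster
-- what changed: Instead of rebuilding the whole strategy list and re-summing all n products for each of the n-k+1 windows, B precomputes prefix sums of prices*strategy and of prices once and evaluates each window's new total with an O(1) delta formula.
-- outside the precondition, e.g. on maxProfitV1([5, 2], [1], 1): A returns 7, B raises IndexError; on maxProfitV1([1], [1], -1): A returns 1, B raises IndexError
import Mathlib
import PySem

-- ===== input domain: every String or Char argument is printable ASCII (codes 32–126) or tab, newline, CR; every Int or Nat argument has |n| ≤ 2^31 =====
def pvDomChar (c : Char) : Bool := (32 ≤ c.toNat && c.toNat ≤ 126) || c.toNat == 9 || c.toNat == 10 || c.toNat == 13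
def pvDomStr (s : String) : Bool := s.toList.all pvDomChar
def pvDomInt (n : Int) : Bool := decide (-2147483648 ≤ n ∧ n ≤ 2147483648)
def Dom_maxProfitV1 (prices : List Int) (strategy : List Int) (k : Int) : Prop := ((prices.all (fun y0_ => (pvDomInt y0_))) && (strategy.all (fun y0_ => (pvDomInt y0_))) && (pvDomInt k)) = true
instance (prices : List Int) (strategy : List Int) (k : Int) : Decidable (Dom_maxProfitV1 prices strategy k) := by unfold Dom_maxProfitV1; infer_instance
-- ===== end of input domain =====

-- B replaces A's per-window rebuild-and-resum (O(n*k+n^2)) by two prefix-sum lists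
-- and an O(1) delta per window (objective: faster, asymptotic).

-- ===== PORT A =====
def maxProfitV1 (prices : List Int) (strategy : List Int) (k : Int) : Int :=
  let n : Int := prices.length
  let total : Int := ((prices.zip strategy).map (fun pq => pq.1 * pq.2)).sum
  let need : Int := PySem.Int.floordiv k 2
  let replacement : List Int := List.replicate need.toNat 0 ++ List.replicate (k - need).toNat 1
  (PySem.List.pyRange 0 (n - k + 1) 1).foldl
    (fun maxProfit i =>
      -- new_strategy[i:i+k] = replacement: for 0 ≤ i and 0 ≤ k (all inputs in Pre_)
      -- Python's slice assignment is exactly this clamped take/drop splice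
      let newStrategy := strategy.take i.toNat ++ replacement ++ strategy.drop (i.toNat + k.toNat)
      let t : Int := ((prices.zip newStrategy).map (fun pq => pq.1 * pq.2)).sum
      if maxProfit < t then t else maxProfit)
    total

-- ===== PORT B =====
def maxProfitV1_alt (prices : List Int) (strategy : List Int) (k : Int) : Int :=
  let n : Int := prices.length
  let pairs := prices.zip strategy
  let ps : List Int := pairs.scanl (fun a pq => a + pq.1 * pq.2) 0   -- Source B's append loop = scanl
  let pp : List Int := pairs.scanl (fun a pq => a + pq.1) 0
  let base : Int := PySem.List.pyGetD ps (-1) 0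
  let h : Int := k - PySem.Int.floordiv k 2
  (PySem.List.pyRange 0 (n - k + 1) 1).foldl
    (fun best i =>
      -- indexing is in range on every input of Pre_ (Python raises outside, excluded there)
      let cand : Int := base - (PySem.List.pyGetD ps (i + k) 0 - PySem.List.pyGetD ps i 0)
                  + (PySem.List.pyGetD pp (i + k) 0 - PySem.List.pyGetD pp (i + k - h) 0)
      if best < cand then cand else best)
    base

-- ===== PRECONDITION & SPEC =====
-- Pre_ excludes negative k and strategies shorter than prices when some window actually
-- overruns the strategy: there A's value is an accident of zip truncation / no-op negative
-- slices while B's prefix-sum indexing raises IndexError.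
def Pre_maxProfitV1 (prices : List Int) (strategy : List Int) (k : Int) : Prop :=
  0 ≤ k ∧ (prices.length ≤ strategy.length ∨ (prices.length : Int) - k + 1 ≤ 0)
instance (prices : List Int) (strategy : List Int) (k : Int) : Decidable (Pre_maxProfitV1 prices strategy k) := by unfold Pre_maxProfitV1; infer_instance
def pvWitness_maxProfitV1 : List Int × List Int × Int := ([3, -1, 5, 2], [1, -1, 0, 1], 2)

def Spec_maxProfitV1 (prices : List Int) (strategy : List Int) (k : Int) (out : Int) : Prop := out = maxProfitV1_alt prices strategy k
instance (prices : List Int) (strategy : List Int) (k : Int) (out : Int) : Decidable (Spec_maxProfitV1 prices strategy k out) := by unfold Spec_maxProfitV1; infer_instance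

-- ===== CLAIM (what is proved, stated in full; the proofs are below) =====
def Claim_equal_maxProfitV1 : Prop := ∀ (prices : List Int) (strategy : List Int) (k : Int), Dom_maxProfitV1 prices strategy k → Pre_maxProfitV1 prices strategy k → Spec_maxProfitV1 prices strategy k (maxProfitV1 prices strategy k)

-- ===== LEMMAS AND PROOFS =====

theorem scanl_add_getElem? {α : Type} (g : α → Int) (l : List α) (c : Int) (j : Nat)
    (hj : j ≤ l.length) :
    (l.scanl (fun a x => a + g x) c)[j]? = some (c + ((l.take j).map g).sum) := by
  induction l generalizing c j with
  | nil =>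
    have : j = 0 := by simpa using hj
    subst this; simp [List.scanl_nil]
  | cons x xs ih =>
    cases j with
    | zero => rw [List.scanl_cons]; simp
    | succ j =>
      rw [List.scanl_cons, List.getElem?_cons_succ, ih (c + g x) j (by simpa using hj)]
      · rw [List.take_succ_cons, List.map_cons, List.sum_cons, Option.some.injEq]
        ring

theorem sum_zip_replicate (xs : List Int) (c : Nat) (v : Int) :
    ((xs.zip (List.replicate c v)).map (fun pq : Int × Int => pq.1 * pq.2)).sum
      = (xs.take c).sum * v := by
  induction xs generalizing c with
  | nil => simp
  | cons x xs ih =>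
    cases c with
    | zero => simp
    | succ c => simp [List.replicate_succ, ih c]; ring

-- (l.zip l').take/drop distribute over both lists (via List.take_zipWith/drop_zipWith)
theorem zip_take_eq (l l' : List Int) (n : Nat) :
    (l.zip l').take n = (l.take n).zip (l'.take n) := by
  simp [List.zip, List.take_zipWith]

theorem zip_drop_eq (l l' : List Int) (n : Nat) :
    (l.zip l').drop n = (l.drop n).zip (l'.drop n) := by
  simp [List.zip, List.drop_zipWith]

theorem zip_chunk (p ys r : List Int) (m : Nat) (hy : ys.length = m) (hm : m ≤ p.length) :
    p.zip (ys ++ r) = (p.take m).zip ys ++ (p.drop m).zip r := by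
  conv_lhs => rw [← List.take_append_drop m p]
  rw [List.zip_append (by rw [List.length_take_of_le hm, hy])]

theorem window_eq (p s : List Int) (hlen : p.length ≤ s.length) (m ν κ : Nat)
    (hν : ν ≤ κ) (hmk : m + κ ≤ p.length) :
    ((p.zip (s.take m ++ (List.replicate ν 0 ++ List.replicate (κ - ν) 1) ++ s.drop (m + κ))).map
        (fun pq => pq.1 * pq.2)).sum
    = ((p.zip s).map (fun pq => pq.1 * pq.2)).sum
      - ((((p.zip s).take (m + κ)).map (fun pq => pq.1 * pq.2)).sum
         - (((p.zip s).take m).map (fun pq => pq.1 * pq.2)).sum)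
      + ((p.take (m + κ)).sum - (p.take (m + ν)).sum) := by
  have hs : m ≤ s.length := by omega
  rw [List.append_assoc, List.append_assoc]
  rw [zip_chunk p _ _ m (List.length_take_of_le hs) (by omega)]
  rw [zip_chunk (p.drop m) _ _ ν (List.length_replicate) (by simp; omega)]
  rw [List.drop_drop]
  rw [zip_chunk (p.drop (m + ν)) _ _ (κ - ν) (List.length_replicate) (by simp; omega)]
  rw [List.drop_drop, show m + ν + (κ - ν) = m + κ from by omega]
  rw [List.map_append, List.map_append, List.map_append,
      List.sum_append, List.sum_append, List.sum_append]
  rw [sum_zip_replicate, sum_zip_replicate]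
  rw [← zip_take_eq, ← zip_drop_eq]
  have hP : (p.take (m + κ)).sum = (p.take (m + ν)).sum + ((p.drop (m + ν)).take (κ - ν)).sum := by
    rw [show m + κ = (m + ν) + (κ - ν) from by omega, List.take_add, List.sum_append]
  have hL : (((p.zip s).take (m + κ)).map (fun pq => pq.1 * pq.2)).sum
      + (((p.zip s).drop (m + κ)).map (fun pq => pq.1 * pq.2)).sum
      = ((p.zip s).map (fun pq => pq.1 * pq.2)).sum := by
    rw [← List.sum_append, ← List.map_append, List.take_append_drop]
  have ht : ((p.drop (m + ν)).take (κ - ν)).take (κ - ν) = (p.drop (m + ν)).take (κ - ν) := by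
    rw [List.take_take]; simp
  rw [ht]
  linarith [hP, hL]

-- value of Source B's prefix-sum list at a nonnegative in-range index
theorem scanl_pyGetD {α : Type} (g : α → Int) (l : List α) (j : Int)
    (h0 : 0 ≤ j) (hj : j.toNat ≤ l.length) :
    PySem.List.pyGetD (l.scanl (fun a x => a + g x) 0) j 0 = ((l.take j.toNat).map g).sum := by
  rw [PySem.List.pyGetD_eq_getElem _ _ h0 (by rw [List.length_scanl]; push_cast; omega)]
  have h := scanl_add_getElem? g l 0 j.toNat hj
  rw [List.getElem?_eq_getElem (by rw [List.length_scanl]; omega)] at h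
  simpa using h

-- ps[-1] is the full sum
theorem scanl_pyGetD_last {α : Type} (g : α → Int) (l : List α) :
    PySem.List.pyGetD (l.scanl (fun a x => a + g x) 0) (-1) 0 = (l.map g).sum := by
  have hne : l.scanl (fun a x => a + g x) 0 ≠ [] := by
    apply List.ne_nil_of_length_pos
    rw [List.length_scanl]; omega
  rw [PySem.List.pyGetD_neg_one _ _ hne, List.getLast_eq_getElem]
  have h := scanl_add_getElem? g l 0 l.length (le_refl _)
  rw [List.getElem?_eq_getElem (by rw [List.length_scanl]; omega)] at h
  simp only [List.length_scanl, Nat.add_sub_cancel]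
  simpa using h

-- the prices-only prefix sums: first components of a window of pairs
theorem zip_map_fst_sum (p s : List Int) (hlen : p.length ≤ s.length) (j : Nat) :
    (((p.zip s).take j).map (fun pq : Int × Int => pq.1)).sum = (p.take j).sum := by
  rw [zip_take_eq]
  rw [show (fun pq : Int × Int => pq.1) = Prod.fst from rfl]
  rw [List.map_fst_zip (by simp; omega)]

theorem maxProfitV1_spec : Claim_equal_maxProfitV1 := by
  unfold Claim_equal_maxProfitV1
  intro p s k _ hpre
  obtain ⟨hk, hor⟩ := hpre
  unfold Spec_maxProfitV1
  simp only [maxProfitV1, maxProfitV1_alt]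
  rcases hor with hlen | hempty
  case inr =>
    rw [PySem.List.pyRange_one_eq_nil (by omega)]
    simp only [List.foldl_nil]
    rw [scanl_pyGetD_last]
  case inl =>
  have hpl : (p.zip s).length = p.length := by rw [List.length_zip, Nat.min_eq_left hlen]
  rw [scanl_pyGetD_last]
  apply PySem.List.foldl_congr_mem'
  intro i hi acc
  rw [PySem.List.mem_pyRange_one] at hi
  obtain ⟨hi0, hiub⟩ := hi
  have hik : i + k ≤ (p.length : Int) := by omega
  have hk2 : PySem.Int.floordiv k 2 = k / 2 := PySem.Int.floordiv_eq_ediv_of_pos (by omega)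
  have hd0 : 0 ≤ k / 2 := Int.ediv_nonneg hk (by omega)
  have hdle : k / 2 ≤ k := Int.ediv_le_self 2 hk
  have ht : ((p.zip (s.take i.toNat ++
        (List.replicate (PySem.Int.floordiv k 2).toNat 0 ++
         List.replicate (k - PySem.Int.floordiv k 2).toNat 1) ++
        s.drop (i.toNat + k.toNat))).map (fun pq => pq.1 * pq.2)).sum
      = ((p.zip s).map (fun pq => pq.1 * pq.2)).sum
        - (PySem.List.pyGetD ((p.zip s).scanl (fun a pq => a + pq.1 * pq.2) 0) (i + k) 0
           - PySem.List.pyGetD ((p.zip s).scanl (fun a pq => a + pq.1 * pq.2) 0) i 0)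
        + (PySem.List.pyGetD ((p.zip s).scanl (fun a pq => a + pq.1) 0) (i + k) 0
           - PySem.List.pyGetD ((p.zip s).scanl (fun a pq => a + pq.1) 0)
               (i + k - (k - PySem.Int.floordiv k 2)) 0) := by
    rw [hk2]
    rw [scanl_pyGetD _ _ (i + k) (by omega) (by rw [hpl]; omega)]
    rw [scanl_pyGetD _ _ i hi0 (by rw [hpl]; omega)]
    rw [scanl_pyGetD _ _ (i + k) (by omega) (by rw [hpl]; omega)]
    rw [scanl_pyGetD _ _ (i + k - (k - k / 2)) (by omega) (by rw [hpl]; omega)]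
    rw [zip_map_fst_sum p s hlen, zip_map_fst_sum p s hlen]
    have e1 : (i + k).toNat = i.toNat + k.toNat := by omega
    have e2 : (i + k - (k - k / 2)).toNat = i.toNat + (k / 2).toNat := by omega
    have e3 : (k - k / 2).toNat = k.toNat - (k / 2).toNat := by omega
    rw [e1, e2, e3]
    exact window_eq p s hlen i.toNat (k / 2).toNat k.toNat (by omega) (by omega)
  rw [ht]
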